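-- pv_equiv track=rewrite | github.com/collinsakenga/codewars_solutions | 6 kyu/6 kyu_Moves in squared strings (II).py | selfie_and_rot
-- ===== SOURCE A (Python) =====
-- from copy import deepcopy
--
-- def rot(s):
--     reserve = [list(i) for i in s.split("\n")]
--     res = deepcopy(reserve)
--     for i in range(len(res)):
--         for j in range(len(res[i])):
--             res[i][j] = reserve[len(reserve)-1-i][len(reserve[i])-1-j]
--     return "\n".join(("".join(i) for i in res))
--
-- def selfie_and_rot(s):
--     temp = s.split("\n")
--     temp2 = rot(s).split("\n")
--     res = [[None]*(len(temp[0])*2) for i in range(len(temp)*2)]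
--     for i in range(len(res)//2):
--         for j in range(len(res[i])):
--             res[i][j] = temp[i][j] if j < len(temp[i]) else "."
--     for i in range(len(res)//2, len(res)):
--         for j in range(len(res[i])):
--             res[i][j] = temp2[i-len(temp2)][j-len(temp2[0])
--                                             ] if j >= len(temp2[0]) else "."
--     return "\n".join(("".join(i) for i in res))
-- ===== SOURCE B (Python) =====
-- def selfie_and_rot(s):
--     # Simpler: build the quadrants by line reversal and concatenation,
--     # no 2D None-grid and no coordinate arithmetic.
--     lines = s.split("\n")
--     dots = "." * len(lines[0])
--     rlines = [line[::-1] for line in reversed(lines)]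
--     return "\n".join([l + dots for l in lines] + [dots + r for r in rlines])
-- ===== Notes on version B (the rewrite author's own statement) =====
-- stated objective: simpler
-- what changed: B replaces A's helper rot() (char-by-char index-mapped copy into a deepcopied grid) and A's 2D None-grid fill with coordinate arithmetic by reversing the line list, reversing each line, and assembling the four quadrants by plain string concatenation.
-- outside the precondition, e.g. on selfie_and_rot('\n1xc\n'): A returns '\n\n\n\n\n', B returns '\n1xc\n\n\ncx1\n'
import Mathlib
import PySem

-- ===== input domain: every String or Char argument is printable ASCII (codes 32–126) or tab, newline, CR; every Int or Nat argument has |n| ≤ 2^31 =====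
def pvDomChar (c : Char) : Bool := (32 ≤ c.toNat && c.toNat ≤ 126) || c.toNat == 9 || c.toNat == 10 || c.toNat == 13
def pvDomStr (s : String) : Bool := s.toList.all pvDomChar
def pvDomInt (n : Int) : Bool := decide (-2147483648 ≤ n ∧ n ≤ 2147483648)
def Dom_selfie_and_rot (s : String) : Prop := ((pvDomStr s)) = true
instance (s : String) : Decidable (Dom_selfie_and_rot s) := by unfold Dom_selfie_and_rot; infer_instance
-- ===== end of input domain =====

-- B builds the four quadrants by line reversal and concatenation instead of A's index-mapped grid fill; same cost, simpler structure.

-- ===== PORT A =====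
-- helper rot(s): char-by-char index-mapped copy `reserve[len(reserve)-1-i][len(reserve[i])-1-j]`.
-- Python list indexing raises IndexError when out of range (such inputs are excluded by Pre_); `getD` is exact in range.
def pvRotA (s : String) : String :=
  let reserve : List (List Char) := PySem.Chars.splitOn s.toList ['\n']
  let res : List (List Char) :=
    (List.range reserve.length).map (fun i =>
      (List.range (reserve.getD i []).length).map (fun j =>
        (reserve.getD (reserve.length - 1 - i) []).getD ((reserve.getD i []).length - 1 - j) ' '))
  String.ofList (PySem.Chars.join ['\n'] res)

def selfie_and_rot (s : String) : String :=
  let temp : List (List Char) := PySem.Chars.splitOn s.toList ['\n']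
  let temp2 : List (List Char) := PySem.Chars.splitOn (pvRotA s).toList ['\n']
  let nRows := 2 * temp.length                     -- len(res)
  let nCols := 2 * (temp.getD 0 []).length         -- len(res[i])
  -- first loop: res[i][j] = temp[i][j] if j < len(temp[i]) else "."
  let top : List (List Char) :=
    (List.range (nRows / 2)).map (fun i =>
      (List.range nCols).map (fun j =>
        if j < (temp.getD i []).length then (temp.getD i []).getD j ' ' else '.'))
  -- second loop: for i in range(len(res)//2, len(res)):
  --   res[i][j] = temp2[i-len(temp2)][j-len(temp2[0])] if j >= len(temp2[0]) else "."
  -- `temp2[i-len(temp2)]` keeps Python's (possibly negative) index semantics via pyGetD.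
  let bot : List (List Char) :=
    (PySem.List.pyRange (nRows / 2 : Nat) (nRows : Nat) 1).map (fun i =>
      (List.range nCols).map (fun j =>
        if (temp2.getD 0 []).length ≤ j then
          (PySem.List.pyGetD temp2 (i - (temp2.length : Int)) []).getD (j - (temp2.getD 0 []).length) ' '
        else '.'))
  String.ofList (PySem.Chars.join ['\n'] (top ++ bot))

-- ===== PORT B =====
def selfie_and_rot_alt (s : String) : String :=
  let lines : List (List Char) := PySem.Chars.splitOn s.toList ['\n']
  let dots : List Char := List.replicate (lines.getD 0 []).length '.'
  let rlines : List (List Char) := lines.reverse.map List.reverse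
  String.ofList (PySem.Chars.join ['\n'] (lines.map (· ++ dots) ++ rlines.map (dots ++ ·)))

-- ===== PRECONDITION & SPEC =====
-- Pre_ excludes strings whose lines do not all have the first line's length (the kata's input is a square
-- block): on those A's grid indexing raises IndexError, or — when the line lengths happen to be
-- mirror-symmetric — returns a grid garbled to the first line's width, an artefact of A's indexing.
def Pre_selfie_and_rot (s : String) : Prop :=
  ∀ l ∈ PySem.Chars.splitOn s.toList ['\n'],
    l.length = ((PySem.Chars.splitOn s.toList ['\n']).getD 0 []).length
instance (s : String) : Decidable (Pre_selfie_and_rot s) := by unfold Pre_selfie_and_rot; infer_instance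

def pvWitness_selfie_and_rot : String := "ab\ncd"

def Spec_selfie_and_rot (s : String) (out : String) : Prop := out = selfie_and_rot_alt s
instance (s : String) (out : String) : Decidable (Spec_selfie_and_rot s out) := by unfold Spec_selfie_and_rot; infer_instance

-- ===== CLAIM (what is proved, stated in full; the proofs are below) =====
def Claim_equal_selfie_and_rot : Prop := ∀ (s : String), Dom_selfie_and_rot s → Pre_selfie_and_rot s → Spec_selfie_and_rot s (selfie_and_rot s)

-- ===== LEMMAS AND PROOFS =====

-- PySem's fueled splitOn on a one-char separator is Lean's List.splitOn.
theorem pvSplitOn_go_eq (c : Char) : ∀ (l : List Char) (fuel : Nat), l.length < fuel →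
    ∀ (cur : List Char) (acc : List (List Char)),
    PySem.Chars.splitOn.go [c] fuel l cur acc
      = acc.reverse ++ (List.splitOn c l).modifyHead (cur.reverse ++ ·) := by
  intro l
  induction l with
  | nil =>
    intro fuel hf cur acc
    cases fuel with
    | zero => omega
    | succ f => simp [PySem.Chars.splitOn.go, List.splitOn_nil]
  | cons x rest ih =>
    intro fuel hf cur acc
    cases fuel with
    | zero => omega
    | succ f =>
      obtain ⟨h, t, hht⟩ : ∃ h t, List.splitOn c rest = h :: t := by
        rcases hsp : List.splitOn c rest with _ | ⟨h, t⟩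
        · exact absurd hsp (by simp [List.splitOn, List.splitOnP_ne_nil])
        · exact ⟨h, t, rfl⟩
      by_cases hx : x = c
      · subst hx
        rw [PySem.Chars.splitOn.go]
        simp only [List.isPrefixOf, BEq.rfl, Bool.true_and, if_true,
          List.length_cons, List.length_nil, List.drop_succ_cons, List.drop_zero]
        rw [ih f (by simpa using Nat.lt_of_succ_lt_succ hf) [] (cur.reverse :: acc)]
        simp only [List.splitOn] at hht ⊢
        simp [List.splitOnP_cons, hht]
      · rw [PySem.Chars.splitOn.go]
        have hpre : [c].isPrefixOf (x :: rest) = false := by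
          simp [List.isPrefixOf]; exact fun hc => absurd hc.symm hx
        rw [hpre]
        simp only [Bool.false_eq_true, if_false]
        rw [ih f (by simpa using Nat.lt_of_succ_lt_succ hf) (x :: cur) acc]
        simp only [List.splitOn] at hht ⊢
        simp [List.splitOnP_cons, hht, beq_iff_eq, hx]

theorem pvSplitOn_eq (c : Char) (cs : List Char) :
    PySem.Chars.splitOn cs [c] = List.splitOn c cs := by
  rw [PySem.Chars.splitOn, pvSplitOn_go_eq c cs (cs.length + 1) (by omega) [] []]
  rcases h : List.splitOn c cs with _ | ⟨a, b⟩ <;> simp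

theorem pvSplitOn_ne_nil (c : Char) (cs : List Char) : List.splitOn c cs ≠ [] := by
  simp [List.splitOn, List.splitOnP_ne_nil]

theorem pvNotMem_splitOnP (p : Char → Bool) : ∀ (cs l : List Char), l ∈ List.splitOnP p cs →
    ∀ x ∈ l, ¬ p x = true := by
  intro cs
  induction cs with
  | nil =>
    intro l hl
    rw [List.splitOnP_nil, List.mem_singleton] at hl
    simp [hl]
  | cons a rest ih =>
    intro l hl x hx
    rw [List.splitOnP_cons] at hl
    by_cases hp : p a = true
    · rw [if_pos hp] at hl
      rcases List.mem_cons.mp hl with hl | hl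
      · simp [hl] at hx
      · exact ih l hl x hx
    · rw [if_neg hp] at hl
      obtain ⟨h, t, hht⟩ : ∃ h t, List.splitOnP p rest = h :: t := by
        rcases hsp : List.splitOnP p rest with _ | ⟨h, t⟩
        · exact absurd hsp (List.splitOnP_ne_nil p rest)
        · exact ⟨h, t, rfl⟩
      rw [hht] at hl
      simp only [List.modifyHead_cons, List.mem_cons] at hl
      rcases hl with hl | hl
      · subst hl
        rcases List.mem_cons.mp hx with hxa | hxh
        · simpa [hxa] using hp
        · exact ih h (by simp [hht]) x hxh
      · exact ih l (by simp [hht, hl]) x hx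

theorem pvNotMem_splitOn (c : Char) (cs l : List Char) (h : l ∈ List.splitOn c cs) : c ∉ l := by
  intro hc
  have := pvNotMem_splitOnP (· == c) cs l (by simpa [List.splitOn] using h) c hc
  simp at this

-- reading a list back from its indices
theorem pvMapRangeGetD {α β : Type} (xs : List α) (d : α) (F : α → β) :
    (List.range xs.length).map (fun i => F (xs.getD i d)) = xs.map F := by
  apply List.ext_getElem
  · simp
  · intro i h1 h2
    have hi : i < xs.length := by simpa using h2
    simp [List.getD_eq_getElem?_getD, List.getElem?_eq_getElem hi]

theorem pvMapRangeGetD' {α : Type} (xs : List α) (d : α) :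
    (List.range xs.length).map (fun i => xs.getD i d) = xs := by
  have := pvMapRangeGetD xs d id
  simpa using this

-- reading a line backwards by indices is its reverse
theorem pvRevRead (r : List Char) (w : Nat) (hr : r.length = w) :
    (List.range w).map (fun j => r.getD (w - 1 - j) ' ') = r.reverse := by
  subst hr
  apply List.ext_getElem
  · simp
  · intro i h1 h2
    have hi : i < r.length := by simpa using h1
    have hlt : r.length - 1 - i < r.length := by omega
    simp [List.getD_eq_getElem?_getD, List.getElem?_eq_getElem hlt, List.getElem_reverse]

-- a top row of A's grid is the line followed by w dots
theorem pvTopRow (r : List Char) (w : Nat) (hr : r.length = w) :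
    (List.range (2 * w)).map (fun j => if j < r.length then r.getD j ' ' else '.')
      = r ++ List.replicate w '.' := by
  subst hr
  rw [two_mul, List.range_add, List.map_append]
  congr 1
  · rw [List.map_congr_left (g := fun j => r.getD j ' ')
      (fun j hj => by rw [if_pos (List.mem_range.mp hj)])]
    exact pvMapRangeGetD' r ' '
  · rw [List.map_map]
    rw [List.map_congr_left (g := fun _ => '.') (fun j hj => by simp)]
    simp

-- a bottom row of A's grid is w dots followed by the rotated line
theorem pvBotRow (r : List Char) (w : Nat) (hr : r.length = w) :
    (List.range (2 * w)).map (fun j => if w ≤ j then r.getD (j - w) ' ' else '.')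
      = List.replicate w '.' ++ r := by
  rw [two_mul, List.range_add, List.map_append]
  congr 1
  · rw [List.map_congr_left (g := fun _ => '.')
      (fun j hj => by rw [if_neg (by simpa using List.mem_range.mp hj)])]
    simp
  · rw [List.map_map]
    rw [List.map_congr_left (g := fun j => r.getD j ' ') (fun j hj => by simp)]
    rw [← hr]
    exact pvMapRangeGetD' r ' '

-- the rot() grid, under equal line lengths, is reverse-of-lines with each line reversed
theorem pvRotA_rows (L : List (List Char)) (w : Nat) (hw : ∀ l ∈ L, l.length = w) :
    (List.range L.length).map (fun i =>
      (List.range (L.getD i []).length).map (fun j =>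
        (L.getD (L.length - 1 - i) []).getD ((L.getD i []).length - 1 - j) ' '))
    = L.reverse.map List.reverse := by
  apply List.ext_getElem
  · simp
  · intro i h1 h2
    have hi : i < L.length := by simpa using h1
    have hi' : L.length - 1 - i < L.length := by omega
    have e1 : L.getD i [] = L[i] := by
      simp [List.getD_eq_getElem?_getD, List.getElem?_eq_getElem hi]
    have e2 : L.getD (L.length - 1 - i) [] = L[L.length - 1 - i] := by
      simp [List.getD_eq_getElem?_getD, List.getElem?_eq_getElem hi']
    have hw1 : (L[i]).length = w := hw _ (List.getElem_mem hi)
    have hw2 : (L[L.length - 1 - i]).length = w := hw _ (List.getElem_mem hi')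
    simp only [List.getElem_map, List.getElem_range, List.getElem_reverse, e1, e2, hw1]
    exact pvRevRead _ w hw2

theorem pvMain (s : String)
    (hpre : ∀ l ∈ PySem.Chars.splitOn s.toList ['\n'],
      l.length = ((PySem.Chars.splitOn s.toList ['\n']).getD 0 []).length) :
    selfie_and_rot s = selfie_and_rot_alt s := by
  simp only [selfie_and_rot, selfie_and_rot_alt, pvSplitOn_eq] at *
  set L := List.splitOn '\n' s.toList with hLdef
  set w := (L.getD 0 []).length with hwdef
  have hL : L ≠ [] := pvSplitOn_ne_nil '\n' s.toList
  have hnl : ∀ l ∈ L, '\n' ∉ l := fun l hl => pvNotMem_splitOn '\n' s.toList l hl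
  set R := L.reverse.map List.reverse with hRdef
  have hRw : ∀ r ∈ R, r.length = w := by
    intro r hr
    rw [hRdef] at hr
    obtain ⟨l, hl, rfl⟩ := List.mem_map.mp hr
    simp [hpre l (List.mem_reverse.mp hl)]
  have hRnl : ∀ r ∈ R, '\n' ∉ r := by
    intro r hr
    rw [hRdef] at hr
    obtain ⟨l, hl, rfl⟩ := List.mem_map.mp hr
    simpa using hnl l (List.mem_reverse.mp hl)
  have hRne : R ≠ [] := by
    rw [hRdef]; simpa using hL
  -- rot(s) splits back into R
  have hrot : List.splitOn '\n' (pvRotA s).toList = R := by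
    simp only [pvRotA, pvSplitOn_eq, ← hLdef]
    rw [pvRotA_rows L w (fun l hl => hpre l hl), ← hRdef]
    rw [String.toList_ofList]
    show List.splitOn '\n' (PySem.Chars.join ['\n'] R) = R
    rw [show PySem.Chars.join ['\n'] R = ['\n'].intercalate R from rfl]
    exact List.splitOn_intercalate R '\n' hRnl hRne
  rw [hrot]
  have hRlen : R.length = L.length := by simp [hRdef]
  have h2n : 2 * L.length / 2 = L.length := by omega
  -- top half
  have htop : (List.range (2 * L.length / 2)).map (fun i =>
      (List.range (2 * w)).map (fun j =>
        if j < (L.getD i []).length then (L.getD i []).getD j ' ' else '.'))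
      = L.map (· ++ List.replicate w '.') := by
    rw [h2n]
    rw [pvMapRangeGetD L [] (fun r => (List.range (2*w)).map (fun j =>
        if j < r.length then r.getD j ' ' else '.'))]
    exact List.map_congr_left (fun r hr => pvTopRow r w (hpre r hr))
  -- bottom half
  have hw0 : (R.getD 0 []).length = w := by
    rcases hR0 : R with _ | ⟨r0, R'⟩
    · exact absurd hR0 hRne
    · exact hRw r0 (by simp [hR0])
  have hbot : (PySem.List.pyRange (2 * L.length / 2 : Nat) ((2 * L.length : Nat)) 1).map (fun i =>
      (List.range (2 * w)).map (fun j =>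
        if (R.getD 0 []).length ≤ j then
          (PySem.List.pyGetD R (i - (R.length : Int)) []).getD (j - (R.getD 0 []).length) ' '
        else '.'))
      = R.map (List.replicate w '.' ++ ·) := by
    rw [h2n, hw0, PySem.List.pyRange_one]
    have hcast : (((2 * L.length : Nat) : Int) - ((L.length : Nat) : Int)).toNat = L.length := by
      omega
    rw [hcast, List.map_map]
    have hbody : ∀ k ∈ List.range L.length,
        ((fun i => (List.range (2 * w)).map (fun j =>
          if w ≤ j then
            (PySem.List.pyGetD R (i - (R.length : Int)) []).getD (j - w) ' '
          else '.')) ∘ (fun k : Nat => ((L.length : Nat) : Int) + k)) k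
        = (fun r => (List.range (2 * w)).map (fun j =>
            if w ≤ j then r.getD (j - w) ' ' else '.')) (R.getD k []) := by
      intro k hk
      simp only [Function.comp]
      have : ((L.length : Nat) : Int) + k - (R.length : Int) = (k : Int) := by
        rw [hRlen]; omega
      rw [this, PySem.List.pyGetD_natCast]
    rw [List.map_congr_left hbody, ← hRlen]
    rw [pvMapRangeGetD R [] (fun r => (List.range (2*w)).map (fun j =>
        if w ≤ j then r.getD (j - w) ' ' else '.'))]
    exact List.map_congr_left (fun r hr => pvBotRow r w (hRw r hr))
  rw [htop, hbot]

-- ===== VERDICT (by name: the statement is the Claim_ definition above) =====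
theorem selfie_and_rot_spec : Claim_equal_selfie_and_rot := by
  intro s _ hpre
  exact pvMain s hpre
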